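-- pv_equiv track=rewrite | github.com/exchris/Pythonlearn | leetcode/code/maxRotateFunction.py | maxRotateFunction_error
-- ===== SOURCE A (Python) =====
-- def maxRotateFunction_error(A):
--     lst, l, index, result = [], len(A), 0, 0
--     while index < l:
--         if index == 0:
--             newlist = A
--         else:
--             newlist = A[-index:] + A[0:l - index]
--         for idx, val in enumerate(newlist):
--             result += idx * val
--         lst.append(result)
--         result = 0
--         index += 1
--     return max(lst) if len(lst) > 0 else 0
-- ===== SOURCE B (Python) =====
-- def maxRotateFunction_error(A):
--     n = len(A)
--     if n == 0:
--         return 0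
--     S = sum(A)
--     F = sum(i * v for i, v in enumerate(A))
--     best = F
--     for k in range(1, n):
--         F += S - n * A[n - k]
--         if F > best:
--             best = F
--     return best
-- ===== Notes on version B (the rewrite author's own statement) =====
-- stated objective: faster
-- what changed: Replaces building every rotation and rescanning it (O(n^2)) with the incremental recurrence F(k) = F(k-1) + sum(A) - n*A[n-k], tracking a running maximum in one pass.
import Mathlib
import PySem

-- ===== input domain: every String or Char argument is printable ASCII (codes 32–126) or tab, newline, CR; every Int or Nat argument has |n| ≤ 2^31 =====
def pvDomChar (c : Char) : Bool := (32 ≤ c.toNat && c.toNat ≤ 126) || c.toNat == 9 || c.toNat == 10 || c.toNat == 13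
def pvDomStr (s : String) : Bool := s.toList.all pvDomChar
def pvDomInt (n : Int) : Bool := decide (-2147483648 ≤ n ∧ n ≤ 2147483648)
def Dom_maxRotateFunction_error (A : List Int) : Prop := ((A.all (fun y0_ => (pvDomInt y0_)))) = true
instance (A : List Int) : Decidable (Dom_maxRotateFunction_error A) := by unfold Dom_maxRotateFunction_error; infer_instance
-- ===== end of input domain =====

-- B replaces A's rebuild-every-rotation-and-rescan (O(n^2)) by the one-pass
-- incremental recurrence F(k) = F(k-1) + sum(A) - n*A[n-k] with a running maximum.

-- ===== PORT A =====
def wsumA (xs : List Int) : Int :=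
  (PySem.List.enumerate xs).foldl (fun r p => r + p.1 * p.2) 0

def loopA (A : List Int) (l index : Nat) (lst : List Int) : List Int :=
  if _h : index < l then
    let newlist := if index = 0 then A
      else PySem.List.slice A (some (-(index : Int))) none ++
           PySem.List.slice A (some 0) (some ((l : Int) - (index : Int)))
    loopA A l (index + 1) (lst ++ [wsumA newlist])
  else lst
termination_by l - index

def maxRotateFunction_error (A : List Int) : Int :=
  let lst := loopA A A.length 0 []
  match PySem.List.max? lst (fun y => y) with
  | some m => m
  | none => 0

-- ===== PORT B =====
def initF (A : List Int) : Int :=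
  (PySem.List.enumerate A).foldl (fun acc p => acc + p.1 * p.2) 0

def maxRotateFunction_error_alt (A : List Int) : Int :=
  let n : Int := A.length
  if n = 0 then 0
  else
    let S := A.sum
    let F := initF A
    let r := (PySem.List.pyRange 1 n 1).foldl
      (fun (st : Int × Int) k =>
        let F' := st.1 + S - n * PySem.List.pyGetD A (n - k) 0
        (F', if F' > st.2 then F' else st.2)) (F, F)
    r.2

-- ===== PRECONDITION & SPEC =====
def Spec_maxRotateFunction_error (A : List Int) (out : Int) : Prop := out = maxRotateFunction_error_alt A
instance (A : List Int) (out : Int) : Decidable (Spec_maxRotateFunction_error A out) := by unfold Spec_maxRotateFunction_error; infer_instance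

-- ===== CLAIM (what is proved, stated in full; the proofs are below) =====
def Claim_equal_maxRotateFunction_error : Prop := ∀ (A : List Int), Dom_maxRotateFunction_error A → Spec_maxRotateFunction_error A (maxRotateFunction_error A)

-- ===== LEMMAS AND PROOFS =====

/-- Proof-side weighted sum with starting index `s`. -/
def wsumFrom (s : Int) : List Int → Int
  | [] => 0
  | x :: t => s * x + wsumFrom (s + 1) t

/-- `Hd A d` = weighted sum of the rotation whose cut point is `d`. -/
def Hd (A : List Int) (d : Nat) : Int := wsumFrom 0 (A.drop d ++ A.take d)

theorem foldl_enum (xs : List Int) (s acc : Int) :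
    (PySem.List.enumerate xs s).foldl (fun r p => r + p.1 * p.2) acc = acc + wsumFrom s xs := by
  induction xs generalizing s acc with
  | nil => simp [PySem.List.enumerate_nil, wsumFrom]
  | cons x t ih => simp [PySem.List.enumerate_cons, wsumFrom, ih]; ring

theorem wsumA_eq (xs : List Int) : wsumA xs = wsumFrom 0 xs := by
  simpa using foldl_enum xs 0 0

theorem initF_eq (xs : List Int) : initF xs = wsumFrom 0 xs := by
  simpa using foldl_enum xs 0 0

theorem wsumFrom_succ (xs : List Int) (s : Int) :
    wsumFrom (s + 1) xs = wsumFrom s xs + xs.sum := by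
  induction xs generalizing s with
  | nil => simp [wsumFrom]
  | cons x t ih => simp [wsumFrom, ih]; ring

theorem wsumFrom_append (xs ys : List Int) (s : Int) :
    wsumFrom s (xs ++ ys) = wsumFrom s xs + wsumFrom (s + xs.length) ys := by
  induction xs generalizing s with
  | nil => simp [wsumFrom]
  | cons x t ih => simp [wsumFrom, ih]; ring_nf

theorem wsumFrom_concat (xs : List Int) (b s : Int) :
    wsumFrom s (xs ++ [b]) = wsumFrom s xs + (s + xs.length) * b := by
  rw [wsumFrom_append]; simp [wsumFrom]

/-- Key recurrence: `Hd d = Hd (d+1) + sum A - n * A[d]` for `d < n`. -/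
theorem Hd_rec (A : List Int) (d : Nat) (hd : d < A.length) :
    Hd A d = Hd A (d + 1) + A.sum - (A.length : Int) * A[d] := by
  have hdrop : A.drop d = A[d] :: A.drop (d + 1) := List.drop_eq_getElem_cons hd
  have htake : A.take (d + 1) = A.take d ++ [A[d]] := by
    rw [List.take_add_one]; simp [List.getElem?_eq_getElem hd]
  have hsum : A.sum = (A.take d).sum + (A[d] + (A.drop (d + 1)).sum) := by
    nth_rewrite 1 [← List.take_append_drop d A]
    rw [hdrop, List.sum_append, List.sum_cons]
  have hlen : ((A.drop (d + 1) ++ A.take d).length : Int) = (A.length : Int) - 1 := by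
    simp [List.length_append, List.length_drop, List.length_take]
    omega
  unfold Hd
  rw [hdrop, htake]
  show wsumFrom 0 (A[d] :: (A.drop (d+1) ++ A.take d)) = _
  rw [show A.drop (d+1) ++ (A.take d ++ [A[d]]) = (A.drop (d+1) ++ A.take d) ++ [A[d]] by
    simp]
  rw [wsumFrom_concat]
  simp only [wsumFrom]
  rw [wsumFrom_succ, hlen, List.sum_append]
  have hsum' : (A.drop (d+1)).sum + (A.take d).sum = A.sum - A[d] := by linarith
  rw [hsum']
  ring

-- ===== A-side characterisation =====

/-- Body of A's outer loop: the weighted sum of rotation number `k`. -/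
def bodyA (A : List Int) (l : Nat) (k : Nat) : Int :=
  wsumA (if k = 0 then A
    else PySem.List.slice A (some (-(k : Int))) none ++
         PySem.List.slice A (some 0) (some ((l : Int) - (k : Int))))

theorem loopA_spec (A : List Int) (l : Nat) :
    ∀ fuel index lst, l = index + fuel →
      loopA A l index lst = lst ++ (List.range' index fuel).map (bodyA A l) := by
  intro fuel
  induction fuel with
  | zero => intro index lst h; unfold loopA; simp [h]
  | succ m ih =>
    intro index lst h
    unfold loopA
    have hlt : index < l := by omega
    simp only [hlt, dif_pos]
    rw [ih (index + 1) _ (by omega)]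
    simp [List.range'_succ, bodyA]

theorem bodyA_eq (A : List Int) (k : Nat) (hk : k < A.length) :
    bodyA A A.length k = Hd A (A.length - k) := by
  unfold bodyA
  by_cases h0 : k = 0
  · subst h0
    simp [wsumA_eq, Hd]
  · have hkpos : 0 < k := Nat.pos_of_ne_zero h0
    rw [if_neg h0]
    rw [PySem.List.slice_from_neg_natCast A k hkpos]
    rw [PySem.List.slice_zero_start]
    have : ((A.length : Int) - (k : Int)) = ((A.length - k : Nat) : Int) := by
      push_cast; omega
    rw [this, PySem.List.slice_to_natCast]
    rw [wsumA_eq, Hd]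

theorem portA_eq (A : List Int) :
    maxRotateFunction_error A
      = match PySem.List.max? ((List.range A.length).map (fun k => Hd A (A.length - k))) (fun y => y) with
        | some m => m
        | none => 0 := by
  unfold maxRotateFunction_error
  rw [loopA_spec A A.length A.length 0 [] (by omega)]
  have : (List.range' 0 A.length).map (bodyA A A.length)
      = (List.range A.length).map (fun k => Hd A (A.length - k)) := by
    rw [← List.range_eq_range']
    apply List.map_congr_left
    intro k hk
    exact bodyA_eq A k (List.mem_range.mp hk)
  rw [this]
  rfl

-- ===== B-side characterisation =====

def stepB (A : List Int) (n S : Int) (st : Int × Int) (k : Int) : Int × Int :=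
  let F' := st.1 + S - n * PySem.List.pyGetD A (n - k) 0
  (F', if F' > st.2 then F' else st.2)

theorem max_eq_ite (a b : Int) : (if b > a then b else a) = max a b := by
  split_ifs with h <;> omega

theorem bfold_inv (A : List Int) (m : Nat) (hm : A.length = m + 1) :
    ∀ i, i ≤ m →
      (PySem.List.pyRange 1 ((i : Int) + 1) 1).foldl (stepB A (A.length : Int) A.sum) (Hd A A.length, Hd A A.length)
        = (Hd A (A.length - i),
           ((List.range i).map (fun k => Hd A (A.length - (k + 1)))).foldl max (Hd A A.length)) := by
  intro i
  induction i with
  | zero =>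
    intro _
    rw [PySem.List.pyRange_one_eq_nil (by omega)]
    simp
  | succ j ih =>
    intro hj
    have hrange : PySem.List.pyRange 1 ((j : Int) + 1 + 1) 1
        = PySem.List.pyRange 1 ((j : Int) + 1) 1 ++ [(j : Int) + 1] := by
      exact PySem.List.pyRange_one_succ_right (by omega)
    have hcast : ((j + 1 : Nat) : Int) + 1 = ((j : Int) + 1) + 1 := by push_cast; ring
    rw [hcast, hrange, List.foldl_append, ih (by omega)]
    -- the single step at k = j+1
    have hd : A.length - (j + 1) < A.length := by omega
    have hidx : (A.length : Int) - ((j : Int) + 1) = ((A.length - (j + 1) : Nat) : Int) := by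
      omega
    have hget : PySem.List.pyGetD A ((A.length : Int) - ((j : Int) + 1)) 0
        = A[A.length - (j + 1)] := by
      rw [hidx, PySem.List.pyGetD_natCast]
      exact List.getD_eq_getElem A 0 hd
    have hrec := Hd_rec A (A.length - (j + 1)) hd
    have hsucc : A.length - (j + 1) + 1 = A.length - j := by omega
    rw [hsucc] at hrec
    simp only [List.foldl_cons, List.foldl_nil, stepB, hget]
    have hF : Hd A (A.length - j) + A.sum - (A.length : Int) * A[A.length - (j + 1)]
        = Hd A (A.length - (j + 1)) := by omega
    rw [hF]
    rw [List.range_succ, List.map_append, List.foldl_append]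
    simp [max_eq_ite]

theorem portB_eq (A : List Int) (m : Nat) (hm : A.length = m + 1) :
    maxRotateFunction_error_alt A
      = ((List.range m).map (fun k => Hd A (A.length - (k + 1)))).foldl max (Hd A A.length) := by
  have hne : (A.length : Int) ≠ 0 := by rw [hm]; omega
  have hAW : initF A = Hd A A.length := by rw [initF_eq, Hd]; simp
  have hcast : ((m : Int) + 1) = (A.length : Int) := by rw [hm]; push_cast [Nat.cast_add]; ring
  have key := bfold_inv A m hm m le_rfl
  rw [hcast] at key
  have hdef : maxRotateFunction_error_alt A
      = (if (A.length : Int) = 0 then 0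
         else ((PySem.List.pyRange 1 ((A.length : Int)) 1).foldl
                 (stepB A (A.length : Int) A.sum) (initF A, initF A)).2) := rfl
  rw [hdef, if_neg hne, hAW, key]

-- max? of a mapped range as a foldl max
theorem maxlist_eq (A : List Int) (m : Nat) (hm : A.length = m + 1) :
    (match PySem.List.max? ((List.range A.length).map (fun k => Hd A (A.length - k))) (fun y => y) with
      | some m => m
      | none => 0)
      = ((List.range m).map (fun k => Hd A (A.length - (k + 1)))).foldl max (Hd A A.length) := by
  rw [hm, List.range_succ_eq_map]
  simp only [List.map_cons, List.map_map]
  rw [PySem.List.max?_id_cons]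
  simp only [Function.comp_def, Nat.succ_eq_add_one, Nat.sub_zero]

-- ===== VERDICT (by name: the statement is the Claim_ definition above) =====
theorem maxRotateFunction_error_spec : Claim_equal_maxRotateFunction_error := by
  intro A _
  unfold Spec_maxRotateFunction_error
  cases hA : A.length with
  | zero =>
    have hnil : A = [] := List.eq_nil_of_length_eq_zero hA
    subst hnil
    have h1 : maxRotateFunction_error_alt [] = 0 := rfl
    rw [portA_eq, h1]
    rfl
  | succ m =>
    rw [portA_eq, portB_eq A m hA, maxlist_eq A m hA]
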